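-- pv_equiv track=rewrite | github.com/flyingaura/PythonLearning | LearnModule/MY_math.py | through_in_list
-- ===== SOURCE A (Python) =====
-- def through_in_list(strlist,m):
--     if (not isinstance(strlist, (str, list, tuple))):
--         raise ValueError('参数错误 --> 第一个输入参数必须为序列类型（list或者tuple）')
--
--     try:
--         # int_n = int(n)
--         int_m = int(m)
--     except ValueError as e:
--         raise ValueError('参数错误 ：%s --> 第二个参数必须为正整数' % e)
--
--     result_list = []
--     if(m == 1):
--         for astr in strlist:
--             result_list.append([astr])
--         return result_list
--
--     for astr in strlist:
--         for aresult in through_in_list(strlist,m - 1):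
--             aresult.insert(0,astr)
--             result_list.append(aresult)
--
--     return result_list
-- ===== SOURCE B (Python) =====
-- def through_in_list(strlist, m):
--     if (not isinstance(strlist, (str, list, tuple))):
--         raise ValueError('参数错误 --> 第一个输入参数必须为序列类型（list或者tuple）')
--     try:
--         int_m = int(m)
--     except ValueError as e:
--         raise ValueError('参数错误 ：%s --> 第二个参数必须为正整数' % e)
--     # iterative left-fold product: start with the m==1 rows, prepend one position per step
--     result = [[x] for x in strlist]
--     for _ in range(int_m - 1):
--         result = [[x] + r for x in strlist for r in result]
--     return result
-- ===== Notes on version B (the rewrite author's own statement) =====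
-- stated objective: simpler
-- what changed: Replaced the recursion (which recomputes the whole (m-1)-product once per strlist element and mutates sublists with insert(0,..)) by a single iterative left fold that builds each level of the product by a list comprehension.
import Mathlib
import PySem

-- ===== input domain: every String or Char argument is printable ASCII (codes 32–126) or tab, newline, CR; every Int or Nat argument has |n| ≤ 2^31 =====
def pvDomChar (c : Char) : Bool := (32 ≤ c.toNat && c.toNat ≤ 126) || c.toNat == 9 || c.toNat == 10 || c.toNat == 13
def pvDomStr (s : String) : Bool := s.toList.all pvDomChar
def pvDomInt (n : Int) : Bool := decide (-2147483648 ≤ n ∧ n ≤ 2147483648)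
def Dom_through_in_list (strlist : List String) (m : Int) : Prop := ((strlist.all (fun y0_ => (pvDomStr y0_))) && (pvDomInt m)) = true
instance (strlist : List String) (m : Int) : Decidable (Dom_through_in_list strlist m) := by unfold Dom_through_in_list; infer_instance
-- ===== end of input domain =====

-- B replaces A's recursion by an iterative left fold building each level of the product once (return value only; A mutates its recursive sublists internally).

-- ===== PORT A =====
-- A recurses with through_in_list(strlist, m-1) until m == 1; for m ≤ 0 with a
-- non-empty strlist the Python recurses forever (RecursionError) — those inputs are
-- outside Pre_, and the port returns [] there (the `else if m ≤ 1` guard exists only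
-- to make the recursion well-founded; it is never reached inside Pre_).
def through_in_list (strlist : List String) (m : Int) : List (List String) :=
  if m = 1 then
    strlist.foldl (fun result_list astr => result_list ++ [[astr]]) []
  else if m ≤ 1 then []  -- Python diverges here; excluded by Pre_
  else
    strlist.foldl (fun result_list astr =>
      (through_in_list strlist (m - 1)).foldl
        (fun result_list aresult => result_list ++ [astr :: aresult]) result_list) []
termination_by m.toNat
decreasing_by omega

-- ===== PORT B =====
def through_in_list_alt (strlist : List String) (m : Int) : List (List String) :=
  (PySem.List.pyRange 0 (m - 1) 1).foldl
    (fun result _ => strlist.flatMap (fun x => result.map (fun r => x :: r)))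
    (strlist.map (fun x => [x]))

-- ===== PRECONDITION & SPEC =====
-- Pre_ excludes exactly the inputs where A raises RecursionError: m ≤ 0 with a non-empty strlist.
def Pre_through_in_list (strlist : List String) (m : Int) : Prop := 1 ≤ m ∨ strlist = []
instance (strlist : List String) (m : Int) : Decidable (Pre_through_in_list strlist m) := by unfold Pre_through_in_list; infer_instance
def pvWitness_through_in_list : List String × Int := (["a", "b"], 2)

def Spec_through_in_list (strlist : List String) (m : Int) (out : List (List String)) : Prop := out = through_in_list_alt strlist m
instance (strlist : List String) (m : Int) (out : List (List String)) : Decidable (Spec_through_in_list strlist m out) := by unfold Spec_through_in_list; infer_instance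

-- ===== CLAIM (what is proved, stated in full; the proofs are below) =====
def Claim_equal_through_in_list : Prop := ∀ (strlist : List String) (m : Int), Dom_through_in_list strlist m → Pre_through_in_list strlist m → Spec_through_in_list strlist m (through_in_list strlist m)

-- ===== LEMMAS AND PROOFS =====

-- A's base case is just a map.
theorem A_base (strlist : List String) :
    through_in_list strlist 1 = strlist.map (fun x => [x]) := by
  rw [through_in_list]
  rw [if_pos rfl, PySem.List.foldl_append_singleton_eq_map]
  simp

-- A's nested append-folds over a fixed subproduct L are init ++ flatMap.
theorem outer_fold_eq (xs : List String) (L : List (List String)) (init : List (List String)) :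
    xs.foldl (fun result_list astr =>
        L.foldl (fun result_list aresult => result_list ++ [astr :: aresult]) result_list) init
      = init ++ xs.flatMap (fun x => L.map (fun r => x :: r)) := by
  induction xs generalizing init with
  | nil => simp
  | cons a t ih =>
    simp only [List.foldl_cons, PySem.List.foldl_append_singleton_eq_map, List.flatMap_cons]
    simp [List.flatMap_def]

-- A's recursive case is a flatMap over the (m-1)-product.
theorem A_step (strlist : List String) (m : Int) (h : 2 ≤ m) :
    through_in_list strlist m
      = strlist.flatMap (fun x => (through_in_list strlist (m - 1)).map (fun r => x :: r)) := by
  rw [through_in_list]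
  rw [if_neg (by omega), if_neg (by omega)]
  simpa using outer_fold_eq strlist (through_in_list strlist (m - 1)) []

-- B's fold peels its last iteration off for m ≥ 2.
theorem B_step (strlist : List String) (m : Int) (h : 2 ≤ m) :
    through_in_list_alt strlist m
      = strlist.flatMap (fun x => (through_in_list_alt strlist (m - 1)).map (fun r => x :: r)) := by
  unfold through_in_list_alt
  have h1 : m - 1 = (m - 1 - 1) + 1 := by ring
  rw [h1, PySem.List.pyRange_one_succ_right (by omega), List.foldl_append]
  simp only [add_sub_cancel_right, List.foldl_cons, List.foldl_nil]

theorem B_base (strlist : List String) :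
    through_in_list_alt strlist 1 = strlist.map (fun x => [x]) := by
  unfold through_in_list_alt
  simp [PySem.List.pyRange]

theorem AB_eq_pos (strlist : List String) (n : Nat) :
    through_in_list strlist ((n : Int) + 1) = through_in_list_alt strlist ((n : Int) + 1) := by
  induction n with
  | zero => rw [Nat.cast_zero, zero_add, A_base, B_base]
  | succ k ih =>
    have h2 : (2 : Int) ≤ ((k : Int) + 1) + 1 := by omega
    have hc : ((k + 1 : Nat) : Int) + 1 = ((k : Int) + 1) + 1 := by push_cast; ring
    rw [hc, A_step _ _ h2, B_step _ _ h2]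
    simp only [add_sub_cancel_right, ih]

-- ===== VERDICT (by name: the statement is the Claim_ definition above) =====
theorem through_in_list_spec : Claim_equal_through_in_list := by
  intro strlist m _ hpre
  unfold Spec_through_in_list
  rcases hpre with hm | hnil
  · obtain ⟨n, rfl⟩ : ∃ n : Nat, m = (n : Int) + 1 :=
      ⟨(m - 1).toNat, by omega⟩
    exact AB_eq_pos strlist n
  · subst hnil
    rw [through_in_list]
    unfold through_in_list_alt
    induction PySem.List.pyRange 0 (m - 1) 1 with
    | nil => simp
    | cons a l ih => simpa using ih
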